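-- pv_equiv track=rewrite | github.com/dbwebb-se/python | example/lecture_prep/solutions/exam.py | verify_hex
-- ===== SOURCE A (Python) =====
-- def verify_hex(hex_value):
--     """
--     Assignment 2
--     """
--     hex_numbers = "0123456789abcdef"
--     if hex_value.startswith("#"):
--         if len(hex_value) in (4, 7):
--             for number in hex_value[1:]:
--                 if not number in hex_numbers:
--                     return False
--             return True
--     return False
-- ===== SOURCE B (Python) =====
-- def verify_hex(hex_value):
--     """
--     Assignment 2
--     """
--     def digits(s, i, count):
--         # consume hex digits one by one, counting; bail once more than 6 seen
--         if i >= len(s):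
--             return count == 3 or count == 6
--         ch = s[i]
--         if count >= 6 or not ('0' <= ch <= '9' or 'a' <= ch <= 'f'):
--             return False
--         return digits(s, i + 1, count + 1)
--     return hex_value[:1] == "#" and digits(hex_value, 1, 0)
-- ===== Notes on version B (the rewrite author's own statement) =====
-- stated objective: alternative
-- what changed: Replaces A's upfront whole-string length test plus membership scan over a lookup string of hex digits with a single recursive pass that consumes one character at a time with a counter (bailing once more than six digits are seen), classifies each character by two closed-interval range comparisons instead of membership in the lookup string, and decides the allowed lengths only when the input is exhausted.
import Mathlib
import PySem

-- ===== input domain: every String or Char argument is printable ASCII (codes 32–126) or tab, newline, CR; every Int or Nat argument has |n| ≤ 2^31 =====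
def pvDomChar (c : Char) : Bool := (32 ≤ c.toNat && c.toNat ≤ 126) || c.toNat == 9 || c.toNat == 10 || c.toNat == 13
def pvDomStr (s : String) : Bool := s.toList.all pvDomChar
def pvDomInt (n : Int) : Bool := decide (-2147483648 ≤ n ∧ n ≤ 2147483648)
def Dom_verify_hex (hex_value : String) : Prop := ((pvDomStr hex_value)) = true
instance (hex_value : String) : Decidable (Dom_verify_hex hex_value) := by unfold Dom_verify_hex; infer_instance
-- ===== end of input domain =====

-- B replaces A's upfront length test + membership scan over a digit string by a single
-- recursive pass with a digit counter and range tests per character (objective: alternative).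

-- ===== PORT A =====
-- the 'for number in hex_value[1:]' loop with its early 'return False'
def verify_hex_loop (hex_numbers : List Char) : List Char → Bool
  | [] => true
  | c :: cs => if !(hex_numbers.contains c) then false else verify_hex_loop hex_numbers cs

def verify_hex (hex_value : String) : Bool :=
  let hex_numbers : String := "0123456789abcdef"
  if PySem.Str.startswith hex_value "#" then
    if PySem.Str.len hex_value == 4 || PySem.Str.len hex_value == 7 then
      verify_hex_loop hex_numbers.toList (PySem.Str.slice hex_value (some 1) none).toList
    else false
  else false

-- ===== PORT B =====
-- the inner recursive 'digits(s, i, count)': walking the index i from 1 is the structural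
-- recursion over the remaining characters
def verify_hex_digits : List Char → Nat → Bool
  | [], count => count == 3 || count == 6
  | ch :: rest, count =>
    if count ≥ 6 || !(('0' ≤ ch && ch ≤ '9') || ('a' ≤ ch && ch ≤ 'f')) then false
    else verify_hex_digits rest (count + 1)

def verify_hex_alt (hex_value : String) : Bool :=
  (PySem.Str.slice hex_value none (some 1) == "#")
    && verify_hex_digits (PySem.Str.slice hex_value (some 1) none).toList 0

-- ===== PRECONDITION & SPEC =====
def Spec_verify_hex (hex_value : String) (out : Bool) : Prop := out = verify_hex_alt hex_value
instance (hex_value : String) (out : Bool) : Decidable (Spec_verify_hex hex_value out) := by unfold Spec_verify_hex; infer_instance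

-- ===== CLAIM (what is proved, stated in full; the proofs are below) =====
def Claim_equal_verify_hex : Prop := ∀ (hex_value : String), Dom_verify_hex hex_value → Spec_verify_hex hex_value (verify_hex hex_value)

-- ===== LEMMAS AND PROOFS =====

theorem verify_hex_loop_eq_all (hs : List Char) (l : List Char) :
    verify_hex_loop hs l = l.all (fun c => hs.contains c) := by
  induction l with
  | nil => rfl
  | cons c cs ih => simp [verify_hex_loop, ih]

-- range test = membership in A's lookup string, character by character
theorem hex_char_range (c : Char) :
    (('0' ≤ c && c ≤ '9') || ('a' ≤ c && c ≤ 'f')) = ("0123456789abcdef".toList.contains c) := by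
  rw [Bool.eq_iff_iff]
  simp [Char.le_def, UInt32.le_iff_toNat_le, Char.ext_iff, ← UInt32.toNat_inj]
  omega

theorem verify_hex_digits_eq (l : List Char) (count : Nat) (h : count ≤ 6) :
    verify_hex_digits l count
      = (l.all (fun c => "0123456789abcdef".toList.contains c)
          && (count + l.length == 3 || count + l.length == 6)) := by
  induction l generalizing count with
  | nil => simp [verify_hex_digits]
  | cons c cs ih =>
    rw [verify_hex_digits, hex_char_range, List.all_cons]
    cases hc : ("0123456789abcdef".toList.contains c) with
    | false => simp only [Bool.not_false, Bool.or_true, if_true, Bool.false_and]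
    | true =>
      simp only [Bool.not_true, Bool.or_false, Bool.true_and]
      by_cases h6 : 6 ≤ count
      · have hce : count = 6 := le_antisymm h h6
        subst hce
        have h2 : (6 + (cs.length + 1) == 3 || 6 + (cs.length + 1) == 6) = false := by
          simp; omega
        simp [List.length_cons, h2]
      · rw [if_neg (by simpa using h6), ih (count + 1) (by omega)]
        have harr : count + 1 + cs.length = count + (cs.length + 1) := by omega
        rw [harr, List.length_cons]

-- ===== VERDICT (by name: the statement is the Claim_ definition above) =====
theorem verify_hex_spec : Claim_equal_verify_hex := by
  intro s _
  show verify_hex s = verify_hex_alt s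
  unfold verify_hex verify_hex_alt
  simp only [verify_hex_loop_eq_all, verify_hex_digits_eq _ 0 (by omega)]
  rw [Bool.eq_iff_iff]
  simp [PySem.Chars.startswith_iff, String.ext_iff, PySem.List.slice_from_one,
        List.prefix_iff_eq_take, List.all_eq_true, PySem.List.slice_to]
  constructor
  · rintro ⟨h1, h2, h3⟩
    have h1' : List.take 1 s.toList = ['#'] := h1.symm
    have hne : 1 ≤ s.toList.length := by
      cases hc : s.toList with
      | nil => rw [hc] at h1'; simp at h1'
      | cons a t => simp
    exact ⟨h1', h3, by omega⟩
  · rintro ⟨h1, h2, h3⟩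
    have hne : 1 ≤ s.toList.length := by
      cases hc : s.toList with
      | nil => rw [hc] at h1; simp at h1
      | cons a t => simp
    exact ⟨h1.symm, by omega, h2⟩
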